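-- pv_equiv track=rewrite | github.com/TUCircle/CYK | cyk.py | possibleCombs
-- ===== SOURCE A (Python) =====
-- def possibleCombs(a,b):
-- 	combs = []
-- 	for i in range(len(a)):
-- 		if a[i] != '-':
-- 			for j in range(len(b)):
-- 				if b[j] != '-':
-- 					add = str(a[i])+str(b[j])
-- 					if (add not in combs):
-- 						combs.append(add)
-- 	return combs
-- ===== SOURCE B (Python) =====
-- def possibleCombs(a, b):
--     # collect the distinct non-dash characters of each string once, in first-occurrence order
--     ua = []
--     seen = set()
--     for ch in a:
--         if ch != '-' and ch not in seen:
--             seen.add(ch)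
--             ua.append(ch)
--     ub = []
--     seen = set()
--     for ch in b:
--         if ch != '-' and ch not in seen:
--             seen.add(ch)
--             ub.append(ch)
--     # pair up the deduplicated alphabets; a seen-set guards the concatenations
--     res = []
--     out = set()
--     for x in ua:
--         for y in ub:
--             s = x + y
--             if s not in out:
--                 out.add(s)
--                 res.append(s)
--     return res
-- ===== Notes on version B (the rewrite author's own statement) =====
-- stated objective: faster
-- what changed: B first deduplicates the non-dash characters of each input into ordered alphabets (seen-sets) and then pairs those alphabets with a set-guarded output, instead of A's membership scan of the growing result list inside the nested character loops.
import Mathlib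
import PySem

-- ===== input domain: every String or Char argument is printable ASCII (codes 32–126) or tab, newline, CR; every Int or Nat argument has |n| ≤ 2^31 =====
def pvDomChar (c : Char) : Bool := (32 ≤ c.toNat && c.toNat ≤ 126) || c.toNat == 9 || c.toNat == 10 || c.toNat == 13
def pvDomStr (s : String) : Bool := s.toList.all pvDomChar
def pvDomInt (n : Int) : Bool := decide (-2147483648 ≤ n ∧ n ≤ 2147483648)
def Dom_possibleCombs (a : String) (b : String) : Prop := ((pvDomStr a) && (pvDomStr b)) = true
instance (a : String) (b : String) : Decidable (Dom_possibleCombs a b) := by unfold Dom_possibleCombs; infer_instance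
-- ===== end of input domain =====

-- B deduplicates each string's non-dash characters once (seen-sets) before pairing,
-- removing A's membership scan of the growing result list inside the nested loops (objective: faster).

-- str(a[i]) + str(b[j]) : concatenation of two one-character strings
def pvPair (x : Char) (y : Char) : String := String.ofList [x, y]

-- ===== PORT A =====
def possibleCombs (a : String) (b : String) : List String :=
  a.toList.foldl
    (fun combs x =>
      if x ≠ '-' then
        b.toList.foldl
          (fun combs y =>
            if y ≠ '-' then
              let add := pvPair x y
              if add ∉ combs then combs ++ [add] else combs
            else combs)
          combs
      else combs)
    []

-- ===== PORT B =====
-- one pass: keep ch if it is not '-' and not yet in the seen-set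
def pvDedupStep (st : List Char × PySem.Set Char) (ch : Char) : List Char × PySem.Set Char :=
  if ch ≠ '-' ∧ ch ∉ st.2 then (st.1 ++ [ch], st.2.add ch) else st

-- output loop body: append the concatenation unless already produced
def pvOutStep (st : List String × PySem.Set String) (s : String) : List String × PySem.Set String :=
  if s ∉ st.2 then (st.1 ++ [s], st.2.add s) else st

def possibleCombs_alt (a : String) (b : String) : List String :=
  let ua := (a.toList.foldl pvDedupStep ([], PySem.Set.empty)).1
  let ub := (b.toList.foldl pvDedupStep ([], PySem.Set.empty)).1
  (ua.foldl
     (fun st x => ub.foldl (fun st y => pvOutStep st (pvPair x y)) st)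
     ([], PySem.Set.empty)).1

-- ===== PRECONDITION & SPEC =====
def Spec_possibleCombs (a : String) (b : String) (out : List String) : Prop := out = possibleCombs_alt a b
instance (a : String) (b : String) (out : List String) : Decidable (Spec_possibleCombs a b out) := by unfold Spec_possibleCombs; infer_instance

-- ===== CLAIM (what is proved, stated in full; the proofs are below) =====
def Claim_equal_possibleCombs : Prop := ∀ (a : String) (b : String), Dom_possibleCombs a b → Spec_possibleCombs a b (possibleCombs a b)

-- ===== LEMMAS AND PROOFS =====

-- "insert unless present" and its iteration (the common skeleton of both programs)
def pvIns {α : Type} [DecidableEq α] (c : List α) (x : α) : List α :=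
  if x ∈ c then c else c ++ [x]

def pvDI {α : Type} [DecidableEq α] (c : List α) (l : List α) : List α :=
  l.foldl pvIns c

theorem pvDI_nil {α : Type} [DecidableEq α] (c : List α) : pvDI c [] = c := rfl

theorem pvDI_cons {α : Type} [DecidableEq α] (c : List α) (x : α) (l : List α) :
    pvDI c (x :: l) = pvDI (pvIns c x) l := rfl

theorem mem_pvIns {α : Type} [DecidableEq α] {c : List α} {x s : α} :
    s ∈ pvIns c x ↔ s ∈ c ∨ s = x := by
  unfold pvIns; split_ifs with h
  · constructor
    · exact Or.inl
    · rintro (hs | rfl) <;> [exact hs; exact h]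
  · simp
theorem mem_pvDI {α : Type} [DecidableEq α] (l : List α) (c : List α) (s : α) :
    s ∈ pvDI c l ↔ s ∈ c ∨ s ∈ l := by
  induction l generalizing c with
  | nil => simp [pvDI_nil]
  | cons x l ih =>
    rw [pvDI_cons, ih, mem_pvIns]
    simp; tauto

theorem pvDI_append {α : Type} [DecidableEq α] (c l₁ l₂ : List α) :
    pvDI c (l₁ ++ l₂) = pvDI (pvDI c l₁) l₂ :=
  List.foldl_append

theorem pvDI_all_mem {α : Type} [DecidableEq α] {c l : List α} (h : ∀ s ∈ l, s ∈ c) :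
    pvDI c l = c := by
  induction l with
  | nil => rfl
  | cons x l ih =>
    rw [pvDI_cons]
    have hx : x ∈ c := h x (by simp)
    rw [pvIns, if_pos hx]
    exact ih (fun s hs => h s (by simp [hs]))

theorem pvDI_pvIns {α : Type} [DecidableEq α] (c p : List α) (x : α) :
    pvDI c (pvIns p x) = pvIns (pvDI c p) x := by
  by_cases h : x ∈ p
  · have hx : x ∈ pvDI c p := (mem_pvDI p c x).2 (Or.inr h)
    unfold pvIns
    rw [if_pos h, if_pos hx]
  · unfold pvIns
    rw [if_neg h, pvDI_append]
    rfl

theorem pvDI_pvDI {α : Type} [DecidableEq α] (l : List α) (c p : List α) :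
    pvDI c (pvDI p l) = pvDI (pvDI c p) l := by
  induction l generalizing p with
  | nil => rfl
  | cons x l ih =>
    rw [pvDI_cons, pvDI_cons, ih (pvIns p x), pvDI_pvIns]

theorem pvDI_dedup {α : Type} [DecidableEq α] (c l : List α) :
    pvDI c (pvDI [] l) = pvDI c l := pvDI_pvDI l c []

theorem pvDI_map_inj {α β : Type} [DecidableEq α] [DecidableEq β] {g : α → β}
    (hg : Function.Injective g) (l c : List α) :
    (pvDI c l).map g = pvDI (c.map g) (l.map g) := by
  induction l generalizing c with
  | nil => rfl
  | cons x l ih =>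
    rw [pvDI_cons, List.map_cons, pvDI_cons, ih]
    congr 1
    unfold pvIns
    by_cases h : x ∈ c
    · rw [if_pos h, if_pos (List.mem_map_of_mem h)]
    · rw [if_neg h, if_neg (by simpa [List.mem_map, hg.eq_iff] using h), List.map_append]
      rfl

-- first-occurrence dedup relative to an already-seen prefix
def pvFd {α : Type} [DecidableEq α] (P : List α) : List α → List α
  | [] => []
  | x :: l => if x ∈ P then pvFd P l else x :: pvFd (P ++ [x]) l

theorem pvDI_eq_append_pvFd {α : Type} [DecidableEq α] (l P : List α) :
    pvDI P l = P ++ pvFd P l := by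
  induction l generalizing P with
  | nil => simp [pvDI_nil, pvFd]
  | cons x l ih =>
    rw [pvDI_cons, pvFd]
    split_ifs with h
    · rw [pvIns, if_pos h, ih]
    · rw [pvIns, if_neg h, ih]
      simp

theorem pvFd_nil_eq {α : Type} [DecidableEq α] (l : List α) :
    pvFd [] l = pvDI [] l := by
  rw [pvDI_eq_append_pvFd]; rfl

-- processing a duplicate outer element adds nothing, so the outer list may be deduplicated
theorem pvFoldl_pvDI_pvFd {α β : Type} [DecidableEq α] [DecidableEq β] (h : α → List β) :
    ∀ (l : List α) (c : List β) (P : List α),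
      (∀ x ∈ P, ∀ s ∈ h x, s ∈ c) →
      l.foldl (fun c x => pvDI c (h x)) c = (pvFd P l).foldl (fun c x => pvDI c (h x)) c := by
  intro l
  induction l with
  | nil => intro c P _; rfl
  | cons x l ih =>
    intro c P hP
    rw [List.foldl_cons, pvFd]
    split_ifs with hx
    · rw [pvDI_all_mem (hP x hx)]
      exact ih c P hP
    · rw [List.foldl_cons]
      apply ih
      intro z hz s hs
      rcases List.mem_append.1 hz with hz | hz
      · exact (mem_pvDI (h x) c s).2 (Or.inl (hP z hz s hs))
      · simp only [List.mem_singleton] at hz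
        subst hz
        exact (mem_pvDI (h z) c s).2 (Or.inr hs)

-- pvPair is injective in each argument
theorem pvPair_inj (x : Char) : Function.Injective (pvPair x) := by
  intro y y' hyy
  unfold pvPair at hyy
  rw [String.ofList_inj] at hyy
  simpa using hyy

-- one step of B's dedup pass, on the equal-components state
theorem pvDedupStep_pair (r : List Char) (ch : Char) :
    pvDedupStep (r, r) ch = if ch ≠ '-' then (pvIns r ch, pvIns r ch) else (r, r) := by
  unfold pvDedupStep
  by_cases hd : ch = '-'
  · simp [hd]
  · by_cases hm : ch ∈ r
    · simp [hd, hm, pvIns]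
    · simp [hd, hm, pvIns, PySem.Set.add, PySem.Set.contains]

-- B's dedup pass computes pvDI over the dash-filtered characters (both components equal)
theorem dedup_loop (l : List Char) :
    ∀ r : List Char, l.foldl pvDedupStep (r, r) = (pvDI r (l.filter (· ≠ '-')), pvDI r (l.filter (· ≠ '-'))) := by
  induction l with
  | nil => intro r; rfl
  | cons ch l ih =>
    intro r
    rw [List.foldl_cons, pvDedupStep_pair, List.filter_cons]
    by_cases hd : ch = '-'
    · rw [if_neg (by simp [hd]), if_neg (by simp [hd])]
      exact ih r
    · rw [if_pos hd, if_pos (show decide (ch ≠ '-') = true by simp [hd]), pvDI_cons]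
      exact ih (pvIns r ch)

-- one step of B's output loop, on the equal-components state
theorem pvOutStep_pair (r : List String) (s : String) :
    pvOutStep (r, r) s = (pvIns r s, pvIns r s) := by
  unfold pvOutStep
  by_cases hm : s ∈ r <;> simp [hm, pvIns, PySem.Set.add, PySem.Set.contains]

-- B's inner output loop computes pvDI on the concatenations (both components equal)
theorem out_inner_loop (x : Char) (ys : List Char) :
    ∀ r : List String,
      ys.foldl (fun st y => pvOutStep st (pvPair x y)) (r, r)
        = (pvDI r (ys.map (pvPair x)), pvDI r (ys.map (pvPair x))) := by
  induction ys with
  | nil => intro r; rfl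
  | cons y ys ih =>
    intro r
    rw [List.foldl_cons, pvOutStep_pair, List.map_cons, pvDI_cons]
    exact ih (pvIns r (pvPair x y))

-- B's full output loop
theorem out_loop (ub : List Char) (xs : List Char) :
    ∀ r : List String,
      xs.foldl (fun st x => ub.foldl (fun st y => pvOutStep st (pvPair x y)) st) (r, r)
        = (xs.foldl (fun c x => pvDI c (ub.map (pvPair x))) r,
           xs.foldl (fun c x => pvDI c (ub.map (pvPair x))) r) := by
  induction xs with
  | nil => intro r; rfl
  | cons x xs ih =>
    intro r
    rw [List.foldl_cons, List.foldl_cons, out_inner_loop]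
    exact ih _

-- a single A-style conditional append is pvIns
theorem stepA_eq (c : List String) (s : String) :
    (if s ∉ c then c ++ [s] else c) = pvIns c s := by
  unfold pvIns
  by_cases h : s ∈ c <;> simp [h]

-- A's inner loop over b computes pvDI on the filtered, paired characters
theorem portA_inner (x : Char) (l : List Char) :
    ∀ c : List String,
      l.foldl (fun combs y => if y ≠ '-' then
          (if pvPair x y ∉ combs then combs ++ [pvPair x y] else combs) else combs) c
        = pvDI c ((l.filter (· ≠ '-')).map (pvPair x)) := by
  induction l with
  | nil => intro c; rfl
  | cons y l ih =>
    intro c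
    rw [List.foldl_cons, List.filter_cons]
    by_cases hy : y = '-'
    · subst hy
      rw [if_neg (by simp), if_neg (by simp)]
      exact ih c
    · rw [if_pos hy, if_pos (show decide (y ≠ '-') = true by simp [hy]), List.map_cons, pvDI_cons, stepA_eq]
      exact ih (pvIns c (pvPair x y))

-- A's outer loop
theorem portA_outer (bs : List Char) (l : List Char) :
    ∀ c : List String,
      l.foldl (fun combs x => if x ≠ '-' then
          bs.foldl (fun combs y => if y ≠ '-' then
            (if pvPair x y ∉ combs then combs ++ [pvPair x y] else combs) else combs) combs
        else combs) c
        = (l.filter (· ≠ '-')).foldl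
            (fun c x => pvDI c ((bs.filter (· ≠ '-')).map (pvPair x))) c := by
  induction l with
  | nil => intro c; rfl
  | cons x l ih =>
    intro c
    rw [List.foldl_cons, List.filter_cons]
    by_cases hx : x = '-'
    · subst hx
      rw [if_neg (by simp), if_neg (by simp)]
      exact ih c
    · rw [if_pos hx, if_pos (show decide (x ≠ '-') = true by simp [hx]), List.foldl_cons, portA_inner]
      exact ih _

-- A as a fold of pvDI over the filtered characters
theorem portA_eq (a b : String) :
    possibleCombs a b
      = (a.toList.filter (· ≠ '-')).foldl
          (fun c x => pvDI c ((b.toList.filter (· ≠ '-')).map (pvPair x))) [] := by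
  unfold possibleCombs
  exact portA_outer b.toList a.toList []

-- B as the same fold over the deduplicated characters
theorem portB_eq (a b : String) :
    possibleCombs_alt a b
      = (pvDI [] (a.toList.filter (· ≠ '-'))).foldl
          (fun c x => pvDI c ((pvDI [] (b.toList.filter (· ≠ '-'))).map (pvPair x))) [] := by
  unfold possibleCombs_alt
  have ha := dedup_loop a.toList []
  have hb := dedup_loop b.toList []
  simp only [PySem.Set.empty] at *
  rw [ha, hb]
  rw [out_loop]

-- ===== VERDICT (by name: the statement is the Claim_ definition above) =====
theorem possibleCombs_spec : Claim_equal_possibleCombs := by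
  intro a b _
  unfold Spec_possibleCombs
  rw [portA_eq, portB_eq]
  set afil := a.toList.filter (· ≠ '-') with hafil
  set bfil := b.toList.filter (· ≠ '-') with hbfil
  -- replace the inner list by its dedup (pointwise in the fold function)
  have hinner : (fun (c : List String) (x : Char) => pvDI c (bfil.map (pvPair x)))
      = fun c x => pvDI c ((pvDI [] bfil).map (pvPair x)) := by
    funext c x
    rw [pvDI_map_inj (pvPair_inj x) bfil []]
    simp only [List.map_nil]
    rw [pvDI_dedup]
  rw [hinner]
  -- replace the outer list by its dedup
  have houter := pvFoldl_pvDI_pvFd (fun x => (pvDI [] bfil).map (pvPair x)) afil [] []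
    (by intro x hx; simp at hx)
  rw [houter, pvFd_nil_eq]
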